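-- pv_equiv track=rewrite | github.com/cafade/Scripts-and-Tools | Mine/get_window_geometry.py | get_numeric_value
-- ===== SOURCE A (Python) =====
-- def get_numeric_value(original_string, keyword):
--     count = 0
--     value = ""
--     original_string = original_string.partition(keyword)[2]
--     for ele in original_string:
--         if ele == ' ':
--             count = count + 1
--             if count == 2:
--                 break
--             value = ""
--         else:
--             value = value + ele
--     return value.strip(',')
-- ===== SOURCE B (Python) =====
-- def get_numeric_value(original_string, keyword):
--     after = original_string.partition(keyword)[2]
--     parts = after.split(' ')
--     token = parts[1] if len(parts) > 1 else parts[0]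
--     return token.strip(',')
-- ===== Notes on version B (the rewrite author's own statement) =====
-- stated objective: simpler
-- what changed: Replaces A's character-by-character scan with a space counter and value resets by tokenise-then-index: split the text after the keyword on single spaces and pick the second token (or the only one), then strip commas.
import Mathlib
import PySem

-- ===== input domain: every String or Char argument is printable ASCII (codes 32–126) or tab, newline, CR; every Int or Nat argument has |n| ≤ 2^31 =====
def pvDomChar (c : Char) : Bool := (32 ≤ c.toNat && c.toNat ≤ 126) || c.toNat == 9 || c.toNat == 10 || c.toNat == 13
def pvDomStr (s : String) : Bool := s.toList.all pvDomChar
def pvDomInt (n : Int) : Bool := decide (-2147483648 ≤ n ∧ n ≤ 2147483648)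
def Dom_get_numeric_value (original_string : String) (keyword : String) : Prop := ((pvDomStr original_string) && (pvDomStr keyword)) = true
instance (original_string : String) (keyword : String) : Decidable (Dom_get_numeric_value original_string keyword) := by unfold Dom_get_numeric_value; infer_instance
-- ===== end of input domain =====

-- B replaces A's char-by-char scan with a space counter by tokenise-then-index (split on ' ', pick the second token or the only one); objective: simpler.

-- ===== PORT A =====
-- s.partition(sep)[2]: exact port of CPython's partition third component for sep ≠ ''
-- (sep found at first occurrence → suffix after it; not found → ''). Used by both Pythons.
def pvPartAfter (cs kw : List Char) : List Char :=
  let f := PySem.Chars.find cs kw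
  if f = -1 then [] else cs.drop (f.toNat + kw.length)

-- the for-loop of A: state (count, value), breaking at the second space
def pvLoopA : List Char → Nat → List Char → List Char
  | [], _, value => value
  | c :: rest, count, value =>
    if c = ' ' then
      if count + 1 = 2 then value else pvLoopA rest (count + 1) []
    else pvLoopA rest count (value ++ [c])

def get_numeric_value (original_string : String) (keyword : String) : String :=
  String.ofList (PySem.Chars.stripChars
    (pvLoopA (pvPartAfter original_string.toList keyword.toList) 0 []) [','])

-- ===== PORT B =====
def get_numeric_value_alt (original_string : String) (keyword : String) : String :=
  String.ofList (PySem.Chars.stripChars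
    (if 1 < (PySem.Chars.splitOn (pvPartAfter original_string.toList keyword.toList) [' ']).length
     then (PySem.Chars.splitOn (pvPartAfter original_string.toList keyword.toList) [' ']).getD 1 []
     else (PySem.Chars.splitOn (pvPartAfter original_string.toList keyword.toList) [' ']).getD 0 []) [','])

-- ===== PRECONDITION & SPEC =====
-- Pre_ excludes exactly keyword = "", on which both Pythons raise ValueError (empty separator).
def Pre_get_numeric_value (original_string : String) (keyword : String) : Prop := keyword ≠ ""
instance (original_string : String) (keyword : String) : Decidable (Pre_get_numeric_value original_string keyword) := by unfold Pre_get_numeric_value; infer_instance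
def pvWitness_get_numeric_value : String × String := ("geometry: 120 340, more", "geometry:")

def Spec_get_numeric_value (original_string : String) (keyword : String) (out : String) : Prop := out = get_numeric_value_alt original_string keyword
instance (original_string : String) (keyword : String) (out : String) : Decidable (Spec_get_numeric_value original_string keyword out) := by unfold Spec_get_numeric_value; infer_instance

-- ===== CLAIM (what is proved, stated in full; the proofs are below) =====
def Claim_equal_get_numeric_value : Prop := ∀ (original_string : String) (keyword : String), Dom_get_numeric_value original_string keyword → Pre_get_numeric_value original_string keyword → Spec_get_numeric_value original_string keyword (get_numeric_value original_string keyword)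

-- ===== LEMMAS AND PROOFS =====

-- reference single-space splitter (proof-only)
def pvSplit : List Char → List Char → List (List Char)
  | [], cur => [cur.reverse]
  | c :: rest, cur => if c = ' ' then cur.reverse :: pvSplit rest [] else pvSplit rest (c :: cur)

lemma pvSplit_ne_nil (cs cur : List Char) : pvSplit cs cur ≠ [] := by
  induction cs generalizing cur with
  | nil => simp [pvSplit]
  | cons c rest ih => by_cases h : c = ' ' <;> simp [pvSplit, h, ih]

lemma pvSplit_head (cs cur : List Char) :
    (pvSplit cs cur).getD 0 [] = cur.reverse ++ cs.takeWhile (· ≠ ' ') := by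
  induction cs generalizing cur with
  | nil => simp [pvSplit]
  | cons c rest ih =>
    by_cases h : c = ' '
    · simp [pvSplit, h, List.takeWhile]
    · rw [show pvSplit (c :: rest) cur = pvSplit rest (c :: cur) from by simp [pvSplit, h]]
      rw [ih (c :: cur)]
      simp [List.takeWhile, h]

lemma splitOn_go_space (fuel : Nat) :
    ∀ (l cur : List Char) (acc : List (List Char)), l.length < fuel →
      PySem.Chars.splitOn.go [' '] fuel l cur acc = acc.reverse ++ pvSplit l cur := by
  induction fuel with
  | zero => intro l cur acc h; omega
  | succ n ih =>
    intro l cur acc h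
    cases l with
    | nil => simp [PySem.Chars.splitOn.go, pvSplit]
    | cons c rest =>
      by_cases hc : c = ' '
      · subst hc
        rw [show PySem.Chars.splitOn.go [' '] (n+1) (' ' :: rest) cur acc =
              PySem.Chars.splitOn.go [' '] n (List.drop 1 (' ' :: rest)) [] (cur.reverse :: acc) by
            simp [PySem.Chars.splitOn.go, List.isPrefixOf]]
        simp only [List.drop_one, List.tail_cons]
        rw [ih rest [] _ (by simp at h ⊢; omega)]
        simp [pvSplit]
      · rw [show PySem.Chars.splitOn.go [' '] (n+1) (c :: rest) cur acc =
              PySem.Chars.splitOn.go [' '] n rest (c :: cur) acc by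
            simp [PySem.Chars.splitOn.go, List.isPrefixOf, Ne.symm hc]]
        rw [ih rest (c :: cur) acc (by simp at h ⊢; omega)]
        simp [pvSplit, hc]

lemma splitOn_space (cs : List Char) :
    PySem.Chars.splitOn cs [' '] = pvSplit cs [] := by
  unfold PySem.Chars.splitOn
  rw [splitOn_go_space (cs.length + 1) cs [] [] (by omega)]
  simp

lemma pvLoopA_one (cs acc : List Char) :
    pvLoopA cs 1 acc = acc ++ cs.takeWhile (· ≠ ' ') := by
  induction cs generalizing acc with
  | nil => simp [pvLoopA]
  | cons c rest ih =>
    by_cases h : c = ' '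
    · simp [pvLoopA, h, List.takeWhile]
    · simp [pvLoopA, h, ih, List.takeWhile]

lemma pvLoopA_eq_select (cs cur : List Char) :
    pvLoopA cs 0 cur.reverse =
      (if 1 < (pvSplit cs cur).length then (pvSplit cs cur).getD 1 []
       else (pvSplit cs cur).getD 0 []) := by
  induction cs generalizing cur with
  | nil => simp [pvLoopA, pvSplit]
  | cons c rest ih =>
    by_cases h : c = ' '
    · subst h
      have hne := pvSplit_ne_nil rest ([] : List Char)
      have hlen : 0 < (pvSplit rest []).length := List.length_pos_of_ne_nil hne
      rw [show pvLoopA (' ' :: rest) 0 cur.reverse = pvLoopA rest 1 [] from by simp [pvLoopA]]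
      rw [show pvSplit (' ' :: rest) cur = cur.reverse :: pvSplit rest [] from by simp [pvSplit]]
      rw [pvLoopA_one]
      rw [if_pos (by simp; omega)]
      have hh := pvSplit_head rest ([] : List Char)
      simp only [List.reverse_nil, List.nil_append] at hh
      cases hk : pvSplit rest [] with
      | nil => exact absurd hk hne
      | cons p ps => simp [hk] at hh ⊢; exact hh.symm
    · rw [show pvLoopA (c :: rest) 0 cur.reverse = pvLoopA rest 0 (cur.reverse ++ [c]) from by
          simp [pvLoopA, h]]
      rw [show pvSplit (c :: rest) cur = pvSplit rest (c :: cur) from by simp [pvSplit, h]]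
      rw [show cur.reverse ++ [c] = (c :: cur).reverse from by simp]
      exact ih (c :: cur)

-- ===== VERDICT (by name: the statement is the Claim_ definition above) =====
theorem get_numeric_value_spec : Claim_equal_get_numeric_value := by
  intro s kw _ _
  unfold Spec_get_numeric_value get_numeric_value get_numeric_value_alt
  have h := pvLoopA_eq_select (pvPartAfter s.toList kw.toList) []
  simp only [List.reverse_nil] at h
  rw [h, splitOn_space]
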